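-- pv_equiv track=rewrite | github.com/KomalVarma17/Reinforcement-Learning | testing.py | truncate_state
-- ===== SOURCE A (Python) =====
-- def truncate_state(state):
--     truncated = []
--     for i in range(len(state)):
--         if i == 0 or i == 1:
--             truncated.append(min(state[i], 20))
--         else:
--             truncated.append(state[i])
--     return tuple(truncated)
-- ===== SOURCE B (Python) =====
-- def truncate_state(state):
--     def clamp_first(xs, k):
--         # clamp the first k elements of the remaining list, recursively
--         if k == 0 or not xs:
--             return tuple(xs)
--         return (min(xs[0], 20),) + clamp_first(xs[1:], k - 1)
--     return clamp_first(list(state), 2)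
-- ===== Notes on version B (the rewrite author's own statement) =====
-- stated objective: alternative
-- what changed: Replaces A's indexed loop with an i==0/i==1 branch by a structural recursion on the list carrying a clamp-budget counter k=2: each step clamps the head and recurses on the tail with k-1, returning the rest untouched when k hits 0.
import Mathlib
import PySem

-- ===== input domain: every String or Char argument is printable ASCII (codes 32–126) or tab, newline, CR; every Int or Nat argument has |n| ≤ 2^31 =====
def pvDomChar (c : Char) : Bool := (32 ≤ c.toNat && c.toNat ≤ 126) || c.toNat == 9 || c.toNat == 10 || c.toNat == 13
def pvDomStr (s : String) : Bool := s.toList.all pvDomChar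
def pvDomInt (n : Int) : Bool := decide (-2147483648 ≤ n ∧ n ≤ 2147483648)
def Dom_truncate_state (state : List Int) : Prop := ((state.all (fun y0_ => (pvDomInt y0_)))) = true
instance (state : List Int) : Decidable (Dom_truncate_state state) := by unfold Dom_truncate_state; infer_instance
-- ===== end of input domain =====

-- B replaces A's indexed loop (with an i==0/i==1 branch) by a structural recursion on the list with a clamp-budget counter; objective: alternative.


-- ===== PORT A =====
-- for i in range(len(state)): append min(state[i],20) if i in {0,1} else state[i]; state[i] never raises here so pyGetD is exact.
def truncate_state (state : List Int) : List Int :=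
  (PySem.List.pyRange 0 (state.length : Int) 1).foldl
    (fun truncated i =>
      truncated ++ [if i == 0 || i == 1 then min (PySem.List.pyGetD state i 0) 20
                    else PySem.List.pyGetD state i 0]) []

-- ===== PORT B =====
-- clamp_first(xs, k): if k == 0 or not xs: return xs; else (min(xs[0],20),) + clamp_first(xs[1:], k-1)
def clampFirst : List Int → Nat → List Int
  | xs, 0 => xs
  | [], _ => []
  | x :: xs, Nat.succ k => min x 20 :: clampFirst xs k

def truncate_state_alt (state : List Int) : List Int :=
  clampFirst state 2

-- ===== PRECONDITION & SPEC =====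
def Spec_truncate_state (state : List Int) (out : List Int) : Prop := out = truncate_state_alt state
instance (state : List Int) (out : List Int) : Decidable (Spec_truncate_state state out) := by unfold Spec_truncate_state; infer_instance

-- ===== CLAIM (what is proved, stated in full; the proofs are below) =====
def Claim_equal_truncate_state : Prop := ∀ (state : List Int), Dom_truncate_state state → Spec_truncate_state state (truncate_state state)

-- ===== LEMMAS AND PROOFS =====
theorem truncate_state_eq_map (state : List Int) :
    truncate_state state =
      (PySem.List.pyRange 0 (state.length : Int) 1).map
        (fun i => if i == 0 || i == 1 then min (PySem.List.pyGetD state i 0) 20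
                  else PySem.List.pyGetD state i 0) := by
  unfold truncate_state
  rw [PySem.List.foldl_append_singleton_eq_map, List.nil_append]

-- ===== VERDICT (by name: the statement is the Claim_ definition above) =====
theorem truncate_state_spec : Claim_equal_truncate_state := by
  intro state _
  show truncate_state state = truncate_state_alt state
  rw [truncate_state_eq_map]
  match state with
  | [] => decide
  | [a] =>
      simp [truncate_state_alt, clampFirst, PySem.List.pyRange_one_cons,
        PySem.List.pyRange_one_eq_nil, PySem.List.pyGetD]
  | a :: b :: rest =>
      have hsplit : PySem.List.pyRange 0 ((a :: b :: rest).length : Int) 1 =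
          PySem.List.pyRange 0 2 1 ++ PySem.List.pyRange 2 ((a :: b :: rest).length : Int) 1 := by
        apply PySem.List.pyRange_one_append 0 2 _ (by omega)
        simp; omega
      rw [hsplit, List.map_append]
      have h2 : PySem.List.pyRange (0:Int) 2 1 = [0, 1] := by decide
      have htail : (PySem.List.pyRange 2 ((a :: b :: rest).length : Int) 1).map
          (fun i => if i == 0 || i == 1 then min (PySem.List.pyGetD (a :: b :: rest) i 0) 20
                    else PySem.List.pyGetD (a :: b :: rest) i 0) =
          (PySem.List.pyRange 2 ((a :: b :: rest).length : Int) 1).map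
          (fun i => PySem.List.pyGetD (a :: b :: rest) i 0) := by
        apply List.map_congr_left
        intro i hi
        have := (PySem.List.mem_pyRange_one).1 hi
        have h0 : ¬ (i == 0 || i == 1) = true := by
          simp only [beq_iff_eq, Bool.or_eq_true, not_or]
          omega
        simp [h0]
      rw [htail, PySem.List.map_pyGetD_pyRange' (a :: b :: rest) 0 (by omega)]
      simp [h2, truncate_state_alt, clampFirst, PySem.List.pyGetD]
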